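-- pv_equiv track=rewrite | github.com/IsaacStanley-me/paypal-django | tools/auto_translate_po.py | parse_po_entries
-- ===== SOURCE A (Python) =====
-- from typing import Optional, Tuple, List
--
-- def parse_po_entries(lines: List[str]) -> List[Tuple[int, int]]:
--     """
--     Return list of (start_index, end_index) line indices that form a single entry (from first comment/msgid to following blank line).
--     """
--     entries = []
--     start = 0
--     in_entry = False
--     for i, line in enumerate(lines):
--         if not in_entry:
--             if line.startswith('#') or line.startswith('msgid') or not line.strip():
--                 start = i
--                 in_entry = True
--         if in_entry and line.strip() == '' and i > start:
--             entries.append((start, i))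
--             in_entry = False
--     if in_entry:
--         entries.append((start, len(lines)))
--     return entries
-- ===== SOURCE B (Python) =====
-- def parse_po_entries(lines):
--     """
--     Return list of (start_index, end_index) line indices that form a single entry (from first comment/msgid to following blank line).
--     """
--     entries = []
--     n = len(lines)
--     i = 0
--     while i < n:
--         line = lines[i]
--         if not (line.startswith('#') or line.startswith('msgid') or not line.strip()):
--             i += 1
--             continue
--         start = i
--         i += 1
--         while i < n and lines[i].strip():
--             i += 1
--         if i < n:
--             entries.append((start, i))
--             i += 1
--         else:
--             entries.append((start, n))
--     return entries
-- ===== Notes on version B (the rewrite author's own statement) =====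
-- stated objective: alternative
-- what changed: Replaced A's single for-loop flag machine (in_entry/start state per line) with an index-driven two-phase scanner: an outer loop that skips to the next trigger line and an inner loop that scans forward to the terminating blank.
import Mathlib
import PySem

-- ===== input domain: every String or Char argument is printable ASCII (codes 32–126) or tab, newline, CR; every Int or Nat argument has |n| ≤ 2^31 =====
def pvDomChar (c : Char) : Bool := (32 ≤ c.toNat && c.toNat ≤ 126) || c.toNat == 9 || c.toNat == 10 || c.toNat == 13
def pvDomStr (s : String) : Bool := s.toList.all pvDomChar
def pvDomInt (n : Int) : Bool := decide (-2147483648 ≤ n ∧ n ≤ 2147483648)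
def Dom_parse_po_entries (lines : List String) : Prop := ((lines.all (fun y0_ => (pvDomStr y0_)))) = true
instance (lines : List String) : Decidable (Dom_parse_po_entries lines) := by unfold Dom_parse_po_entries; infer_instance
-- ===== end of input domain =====

-- B replaces A's per-line flag machine by an index-driven two-phase scanner (skip to a
-- trigger line, then scan forward to the terminating blank); same return value, objective: alternative.

-- ===== PORT A =====
-- "line.startswith('#') or line.startswith('msgid') or not line.strip()"
def pvTrigger (line : String) : Bool :=
  PySem.Str.startswith line "#" || PySem.Str.startswith line "msgid" || (PySem.Str.strip line == "")

-- the for-loop of A, state (entries, start, in_entry), i the current index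
def pvALoop : List String → Int → List (Int × Int) → Int → Bool → List (Int × Int) × Int × Bool
  | [], _, entries, start, in_entry => (entries, start, in_entry)
  | line :: rest, i, entries, start, in_entry =>
    let start2 := if !in_entry && pvTrigger line then i else start
    let in2 := if !in_entry && pvTrigger line then true else in_entry
    if in2 && (PySem.Str.strip line == "") && decide (start2 < i) then
      pvALoop rest (i + 1) (entries ++ [(start2, i)]) start2 false
    else
      pvALoop rest (i + 1) entries start2 in2

def parse_po_entries (lines : List String) : List (Int × Int) :=
  match pvALoop lines 0 [] 0 false with
  | (entries, start, in_entry) =>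
      if in_entry then entries ++ [(start, (lines.length : Int))] else entries

-- ===== PORT B =====
-- outer while loop of B: advance i past non-trigger lines; on a trigger, hand over to the
-- inner terminator scan starting at start+1
mutual
def pvBFind (n : Int) : Int → List String → List (Int × Int)
  | _, [] => []
  | i, line :: rest =>
    if pvTrigger line then
      pvBTerm n i (i + 1) rest
    else
      pvBFind n (i + 1) rest

-- inner while loop of B: scan forward from i while lines are non-blank; close at the blank
-- (and resume skipping after it) or at the end of input
def pvBTerm (n start : Int) : Int → List String → List (Int × Int)
  | _, [] => [(start, n)]
  | i, line :: rest =>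
    if PySem.Str.strip line == "" then (start, i) :: pvBFind n (i + 1) rest
    else pvBTerm n start (i + 1) rest
end

def parse_po_entries_alt (lines : List String) : List (Int × Int) :=
  pvBFind (lines.length : Int) 0 lines

-- ===== PRECONDITION & SPEC =====
def Spec_parse_po_entries (lines : List String) (out : List (Int × Int)) : Prop := out = parse_po_entries_alt lines
instance (lines : List String) (out : List (Int × Int)) : Decidable (Spec_parse_po_entries lines out) := by unfold Spec_parse_po_entries; infer_instance

-- ===== CLAIM (what is proved, stated in full; the proofs are below) =====
def Claim_equal_parse_po_entries : Prop := ∀ (lines : List String), Dom_parse_po_entries lines → Spec_parse_po_entries lines (parse_po_entries lines)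

-- ===== LEMMAS AND PROOFS =====

-- A's final "if in_entry: append (start, len(lines))" as a function of the loop state
def pvFin (n : Int) : List (Int × Int) × Int × Bool → List (Int × Int)
  | (entries, start, in_entry) => if in_entry then entries ++ [(start, n)] else entries

-- the loop invariant: from any point, A's finished run equals the already-emitted entries
-- followed by B's scan, in both the "searching" and the "inside an entry" phase
lemma pvKey : ∀ (rest : List String) (i : Int) (entries : List (Int × Int)),
    (∀ start : Int,
      pvFin (i + rest.length) (pvALoop rest i entries start false)
        = entries ++ pvBFind (i + rest.length) i rest) ∧
    (∀ start : Int, start < i →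
      pvFin (i + rest.length) (pvALoop rest i entries start true)
        = entries ++ pvBTerm (i + rest.length) start i rest) := by
  intro rest
  induction rest with
  | nil =>
      intro i entries
      refine ⟨fun start => by simp [pvALoop, pvBFind, pvFin],
              fun start h => by simp [pvALoop, pvBTerm, pvFin]⟩
  | cons line rest ih =>
      intro i entries
      have hlen : (i + ((line :: rest).length : Int)) = (i + 1) + (rest.length : Int) := by
        simp; ring
      constructor
      · intro start
        by_cases ht : pvTrigger line = true
        · -- opens an entry at i; cannot close on the same line (start2 = i, ¬ i < i)
          have hstep : pvALoop (line :: rest) i entries start false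
              = pvALoop rest (i + 1) entries i true := by
            simp [pvALoop, ht]
          rw [hstep, hlen, (ih (i + 1) entries).2 i (by omega)]
          simp [pvBFind, ht]
        · -- not a trigger: skip the line in both versions
          have hstep : pvALoop (line :: rest) i entries start false
              = pvALoop rest (i + 1) entries start false := by
            simp [pvALoop, ht]
          rw [hstep, hlen, (ih (i + 1) entries).1 start]
          simp [pvBFind, ht]
      · intro start hlt
        by_cases hb : (PySem.Str.strip line == "") = true
        · -- blank line closes the open entry
          have hstep : pvALoop (line :: rest) i entries start true
              = pvALoop rest (i + 1) (entries ++ [(start, i)]) start false := by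
            simp [pvALoop, hb, hlt]
          rw [hstep, hlen, (ih (i + 1) (entries ++ [(start, i)])).1 start]
          simp [pvBTerm, hb]
        · -- non-blank line inside the entry: keep scanning
          have hstep : pvALoop (line :: rest) i entries start true
              = pvALoop rest (i + 1) entries start true := by
            simp [pvALoop, hb]
          rw [hstep, hlen, (ih (i + 1) entries).2 start (by omega)]
          simp [pvBTerm, hb]

-- ===== VERDICT (by name: the statement is the Claim_ definition above) =====
theorem parse_po_entries_spec : Claim_equal_parse_po_entries := by
  intro lines _
  unfold Spec_parse_po_entries parse_po_entries parse_po_entries_alt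
  have h := (pvKey lines 0 []).1 0
  simp only [zero_add] at h
  rw [show (match pvALoop lines 0 [] 0 false with
      | (entries, start, in_entry) =>
          if in_entry then entries ++ [(start, (lines.length : Int))] else entries)
      = pvFin (lines.length : Int) (pvALoop lines 0 [] 0 false) from by
        cases pvALoop lines 0 [] 0 false with
        | mk a b => cases b with | mk s e => rfl]
  rw [h]; simp
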